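-- pv_equiv track=rewrite | github.com/Eduarda34/FEUP-FPRO | Teste 3/Teste 1 24.25/exercise4.py | triangulars
-- ===== SOURCE A (Python) =====
-- def isTriangulo(n):
--     res = 0
--     for i in range(1, n+1):
--         res += i
--     return res
--
-- def triangulars(n):
--     resOdd = 0
--     resEven = 0
--     total = 0
--
--     for i in range(1, n+1):
--         if i%2 == 0:
--             resEven += isTriangulo(i)
--
--         else:
--             resOdd += (isTriangulo(i) + isTriangulo(i+1))
--
--     total = resOdd + resEven
--     return total
-- ===== SOURCE B (Python) =====
-- def triangulars(n):
--     # O(1) closed form: sum of T(i) for i=1..n plus, for each odd i<=n, T(i+1).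
--     if n < 0:
--         n = 0
--     k = (n + 1) // 2
--     return n * (n + 1) * (n + 2) // 6 + k * (k + 1) * (4 * k + 5) // 6
-- ===== Notes on version B (the rewrite author's own statement) =====
-- stated objective: faster
-- what changed: Replaced the quadratic nested summation loops (outer parity loop calling an inner triangular-number loop) with a single constant-time closed-form polynomial formula using floor division.
import Mathlib
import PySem

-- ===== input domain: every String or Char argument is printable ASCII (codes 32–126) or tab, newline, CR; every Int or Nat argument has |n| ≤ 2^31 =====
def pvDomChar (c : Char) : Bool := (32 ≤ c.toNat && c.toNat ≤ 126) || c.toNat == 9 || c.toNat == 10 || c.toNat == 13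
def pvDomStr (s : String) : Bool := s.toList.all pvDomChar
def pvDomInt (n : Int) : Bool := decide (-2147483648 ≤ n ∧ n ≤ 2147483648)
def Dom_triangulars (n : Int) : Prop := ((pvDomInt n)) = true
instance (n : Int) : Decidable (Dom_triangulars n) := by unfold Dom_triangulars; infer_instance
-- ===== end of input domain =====

-- B replaces A's quadratic nested summation loops with a constant-time closed-form formula (objective: faster, measured).

-- ===== PORT A =====
def isTriangulo (n : Int) : Int :=
  (PySem.List.pyRange 1 (n + 1) 1).foldl (fun res i => res + i) 0

def triangulars (n : Int) : Int :=
  let st := (PySem.List.pyRange 1 (n + 1) 1).foldl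
    (fun (p : Int × Int) i =>
      if PySem.Int.mod i 2 = 0 then (p.1, p.2 + isTriangulo i)
      else (p.1 + (isTriangulo i + isTriangulo (i + 1)), p.2))
    (0, 0)
  st.1 + st.2

-- ===== PORT B =====
def triangulars_alt (n : Int) : Int :=
  let m : Int := if n < 0 then 0 else n
  let k : Int := PySem.Int.floordiv (m + 1) 2
  PySem.Int.floordiv (m * (m + 1) * (m + 2)) 6 +
    PySem.Int.floordiv (k * (k + 1) * (4 * k + 5)) 6

-- ===== PRECONDITION & SPEC =====
def Spec_triangulars (n : Int) (out : Int) : Prop := out = triangulars_alt n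
instance (n : Int) (out : Int) : Decidable (Spec_triangulars n out) := by unfold Spec_triangulars; infer_instance

-- ===== CLAIM (what is proved, stated in full; the proofs are below) =====
def Claim_equal_triangulars : Prop := ∀ (n : Int), Dom_triangulars n → Spec_triangulars n (triangulars n)

-- ===== LEMMAS AND PROOFS =====

lemma isTri_succ (m : Nat) : isTriangulo ((m : Int) + 1) = isTriangulo (m : Int) + ((m : Int) + 1) := by
  unfold isTriangulo
  rw [PySem.List.pyRange_one_succ_right (by omega)]
  simp

lemma two_isTri (m : Nat) : 2 * isTriangulo (m : Int) = (m : Int) * ((m : Int) + 1) := by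
  induction m with
  | zero => norm_num; decide
  | succ t ih =>
    push_cast
    rw [isTri_succ t]
    push_cast at ih ⊢
    linarith [ih]

-- one loop step of A's outer loop
lemma tri_step (m : Nat) :
    triangulars ((m : Int) + 1) =
      triangulars (m : Int) +
        (if PySem.Int.mod ((m : Int) + 1) 2 = 0 then isTriangulo ((m : Int) + 1)
         else isTriangulo ((m : Int) + 1) + isTriangulo ((m : Int) + 2)) := by
  unfold triangulars
  rw [PySem.List.pyRange_one_succ_right (by omega), List.foldl_append]
  set p := (PySem.List.pyRange 1 ((m : Int) + 1) 1).foldl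
    (fun (p : Int × Int) i =>
      if PySem.Int.mod i 2 = 0 then (p.1, p.2 + isTriangulo i)
      else (p.1 + (isTriangulo i + isTriangulo (i + 1)), p.2)) (0, 0) with hp
  simp only [List.foldl_cons, List.foldl_nil]
  split_ifs with h <;> simp [add_assoc, add_left_comm, add_comm]

lemma six_tri (t : Nat) :
    6 * triangulars (2 * (t : Int)) =
        (2 * (t : Int)) * (2 * t + 1) * (2 * t + 2) + (t : Int) * (t + 1) * (4 * t + 5) ∧
    6 * triangulars (2 * (t : Int) + 1) =
        (2 * (t : Int) + 1) * (2 * t + 2) * (2 * t + 3) + ((t : Int) + 1) * (t + 2) * (4 * t + 9) := by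
  induction t with
  | zero => constructor <;> norm_num <;> decide
  | succ s ih =>
    obtain ⟨ihe, iho⟩ := ih
    have he : triangulars (2 * ((s : Int) + 1)) =
        triangulars (2 * (s : Int) + 1) + isTriangulo (2 * (s : Int) + 2) := by
      have h := tri_step (2 * s + 1)
      push_cast at h
      rw [show (2 * ((s : Int) + 1)) = (2 * (s : Int) + 1) + 1 by ring, h]
      rw [if_pos (by rw [PySem.Int.mod_eq_emod_of_pos (by norm_num)]; omega)]
      ring_nf
    have ho : triangulars (2 * ((s : Int) + 1) + 1) =
        triangulars (2 * ((s : Int) + 1)) +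
          (isTriangulo (2 * (s : Int) + 3) + isTriangulo (2 * (s : Int) + 4)) := by
      have h := tri_step (2 * s + 2)
      push_cast at h
      rw [show (2 * ((s : Int) + 1) + 1) = (2 * (s : Int) + 2) + 1 by ring, h]
      rw [if_neg (by rw [PySem.Int.mod_eq_emod_of_pos (by norm_num)]; omega)]
      ring_nf
    have t1 := two_isTri (2 * s + 2)
    have t2 := two_isTri (2 * s + 3)
    have t3 := two_isTri (2 * s + 4)
    push_cast at t1 t2 t3
    constructor
    · rw [show (2 * ((s : Int) + 1)) = 2 * ((s:Int) + 1) from rfl] at he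
      push_cast
      rw [he]
      linear_combination iho + 3 * t1
    · push_cast
      rw [ho, he]
      linear_combination iho + 3 * t1 + 3 * t2 + 3 * t3

lemma six_dvd_consec (x : Int) : (6 : Int) ∣ x * (x + 1) * (x + 2) := by
  have h2 : (2 : Int) ∣ x * (x + 1) * (x + 2) :=
    Dvd.dvd.mul_right (Int.even_mul_succ_self x).two_dvd _
  have h3 : (3 : Int) ∣ x * (x + 1) * (x + 2) := by
    have hr : x % 3 = 0 ∨ x % 3 = 1 ∨ x % 3 = 2 := by omega
    obtain ⟨q, hq⟩ : ∃ q, x = 3 * q + x % 3 := ⟨x / 3, by omega⟩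
    rcases hr with h | h | h <;> rw [h] at hq <;> subst hq
    · exact ⟨q * (3 * q + 1) * (3 * q + 2), by ring⟩
    · exact ⟨(3 * q + 1) * (3 * q + 2) * (q + 1), by ring⟩
    · exact ⟨(3 * q + 2) * (q + 1) * (3 * q + 4), by ring⟩
  obtain ⟨a, ha⟩ := h2; obtain ⟨b, hb⟩ := h3
  exact ⟨a - b, by omega⟩

lemma six_dvd_kpoly (k : Int) : (6 : Int) ∣ k * (k + 1) * (4 * k + 5) := by
  have h2 : (2 : Int) ∣ k * (k + 1) * (4 * k + 5) :=
    Dvd.dvd.mul_right (Int.even_mul_succ_self k).two_dvd _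
  have h3 : (3 : Int) ∣ k * (k + 1) * (4 * k + 5) := by
    have hr : k % 3 = 0 ∨ k % 3 = 1 ∨ k % 3 = 2 := by omega
    obtain ⟨q, hq⟩ : ∃ q, k = 3 * q + k % 3 := ⟨k / 3, by omega⟩
    rcases hr with h | h | h <;> rw [h] at hq <;> subst hq
    · exact ⟨q * (3 * q + 1) * (12 * q + 5), by ring⟩
    · exact ⟨(3 * q + 1) * (3 * q + 2) * (4 * q + 3), by ring⟩
    · exact ⟨(3 * q + 2) * (q + 1) * (12 * q + 13), by ring⟩
  obtain ⟨a, ha⟩ := h2; obtain ⟨b, hb⟩ := h3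
  exact ⟨a - b, by omega⟩

lemma fdiv_six {x c : Int} (h : x = 6 * c) : PySem.Int.floordiv x 6 = c := by
  rw [PySem.Int.floordiv_eq_ediv_of_pos (by norm_num), h]
  omega

lemma alt_of_six {n X : Int} (hn : 0 ≤ n) (h6 : 6 * triangulars n = X)
    (hX : X = n * (n + 1) * (n + 2) +
      (PySem.Int.floordiv (n + 1) 2) * ((PySem.Int.floordiv (n + 1) 2) + 1) *
        (4 * (PySem.Int.floordiv (n + 1) 2) + 5)) :
    triangulars n = triangulars_alt n := by
  simp only [triangulars_alt, if_neg (show ¬ n < 0 by omega)]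
  obtain ⟨a, ha⟩ := six_dvd_consec n
  obtain ⟨b, hb⟩ := six_dvd_kpoly (PySem.Int.floordiv (n + 1) 2)
  rw [fdiv_six ha, fdiv_six hb]
  omega

-- ===== VERDICT (by name: the statement is the Claim_ definition above) =====
theorem triangulars_spec : Claim_equal_triangulars := by
  intro n _
  unfold Spec_triangulars
  rcases le_or_gt n 0 with hn | hn
  · have hA : triangulars n = 0 := by
      unfold triangulars
      rw [PySem.List.pyRange_one_eq_nil (by omega)]
      simp
    have hk : PySem.Int.floordiv (0 + 1) 2 = 0 := by
      rw [PySem.Int.floordiv_eq_ediv_of_pos (by norm_num)]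
      decide
    rcases lt_or_eq_of_le hn with hlt | heq
    · simp only [triangulars_alt, if_pos hlt]
      simp only [hk]
      rw [hA]
      norm_num [PySem.Int.floordiv]
    · subst heq
      simp only [triangulars_alt, if_neg (show ¬ (0:Int) < 0 by omega)]
      simp only [hk]
      rw [hA]
      norm_num [PySem.Int.floordiv]
  · obtain ⟨m, rfl⟩ : ∃ m : Nat, n = (m : Int) := ⟨n.toNat, by omega⟩
    rcases Nat.even_or_odd m with ⟨t, ht⟩ | ⟨t, ht⟩
    · subst ht
      rw [show ((t + t : Nat) : Int) = 2 * (t : Int) by push_cast; ring]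
      obtain ⟨h6, -⟩ := six_tri t
      have hk : PySem.Int.floordiv (2 * (t : Int) + 1) 2 = (t : Int) := by
        rw [PySem.Int.floordiv_eq_ediv_of_pos (by norm_num)]; omega
      exact alt_of_six (by positivity) h6 (by rw [hk]; try ring)
    · subst ht
      rw [show ((2 * t + 1 : Nat) : Int) = 2 * (t : Int) + 1 by push_cast; ring]
      obtain ⟨-, h6⟩ := six_tri t
      have hk : PySem.Int.floordiv (2 * (t : Int) + 1 + 1) 2 = (t : Int) + 1 := by
        rw [PySem.Int.floordiv_eq_ediv_of_pos (by norm_num)]; omega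
      exact alt_of_six (by positivity) h6 (by rw [hk]; try ring)
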